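-- pv_equiv track=rewrite | github.com/manasmehta18/CSE-587-Term-Project | utils/metrics_sl_and_qa_2.py | find_longest_match
-- ===== SOURCE A (Python) =====
-- def find_longest_match(span_idx:list,st_lis:list,ed_lis:list):
--     best_score = -9999
--     best_st,best_ed = None,None
--     for st,ed in zip(st_lis,ed_lis):
--         t = list(range(st,ed))
--         assert st <= ed
--         overlap=[idx for idx in span_idx if idx in t]
--         score = len(overlap)
--         if score > best_score:
--             best_score = score
--             best_st,best_ed = st,ed
--
--     return best_st,best_ed
-- ===== SOURCE B (Python) =====
-- def find_longest_match(span_idx: list, st_lis: list, ed_lis: list):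
--     pairs = list(zip(st_lis, ed_lis))
--     for st, ed in pairs:
--         assert st <= ed
--     if not pairs:
--         return None, None
--     s = sorted(span_idx)
--     n = len(s)
--
--     def lower(x):
--         # first position where s[pos] >= x  (= number of elements < x)
--         lo, hi = 0, n
--         while lo < hi:
--             mid = (lo + hi) // 2
--             if s[mid] < x:
--                 lo = mid + 1
--             else:
--                 hi = mid
--         return lo
--
--     st, ed = max(pairs, key=lambda p: lower(p[1]) - lower(p[0]))
--     return st, ed
-- ===== Notes on version B (the rewrite author's own statement) =====
-- stated objective: faster
-- what changed: B sorts span_idx once and scores each (st,ed) pair with two hand-rolled binary searches (count of span indices in [st,ed)) and picks the best pair with max(key=...), instead of materialising list(range(st,ed)) and scanning it for every span index in a hand-rolled best-score loop.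
import Mathlib
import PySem

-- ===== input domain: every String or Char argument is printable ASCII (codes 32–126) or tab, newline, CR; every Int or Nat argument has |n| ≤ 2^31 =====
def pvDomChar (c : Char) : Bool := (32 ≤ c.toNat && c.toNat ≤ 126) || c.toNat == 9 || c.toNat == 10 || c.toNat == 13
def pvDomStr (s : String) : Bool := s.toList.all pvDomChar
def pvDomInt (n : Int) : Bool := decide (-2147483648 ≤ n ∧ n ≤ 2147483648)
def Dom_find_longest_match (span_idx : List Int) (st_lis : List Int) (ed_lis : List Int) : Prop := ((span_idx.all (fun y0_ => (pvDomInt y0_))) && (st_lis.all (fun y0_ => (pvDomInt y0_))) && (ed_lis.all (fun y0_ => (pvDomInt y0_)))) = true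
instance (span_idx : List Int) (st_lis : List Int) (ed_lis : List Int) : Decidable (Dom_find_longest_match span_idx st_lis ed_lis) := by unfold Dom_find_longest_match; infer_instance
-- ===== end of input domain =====

-- B sorts span_idx once and scores each (st,ed) pair by two binary searches (count of indices in
-- [st,ed)) instead of materialising list(range(st,ed)) and scanning it per index; best pair via max(key=...).

-- ===== PORT A =====
def find_longest_match (span_idx : List Int) (st_lis : List Int) (ed_lis : List Int) : List (Option Int) :=
  let r := (st_lis.zip ed_lis).foldl
    (fun (s : Int × Option Int × Option Int) (p : Int × Int) =>
      let t := PySem.List.pyRange p.1 p.2 1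
      let overlap := span_idx.filter (fun idx => t.contains idx)
      let score : Int := overlap.length
      if s.1 < score then (score, some p.1, some p.2) else s)
    ((-9999 : Int), (none : Option Int), (none : Option Int))
  [r.2.1, r.2.2]

-- ===== PORT B =====
-- Source B's hand-written 'lower' binary-search loop (while lo < hi), step for step; the index s[mid]
-- is always in range (lo < hi ≤ len s), so getD is exact there.
def lowerAux (s : List Int) (x : Int) (lo hi : Nat) : Nat :=
  if _h : lo < hi then
    if s.getD ((lo + hi) / 2) 0 < x then lowerAux s x ((lo + hi) / 2 + 1) hi
    else lowerAux s x lo ((lo + hi) / 2)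
  else lo
termination_by hi - lo
decreasing_by all_goals omega

-- key of Source B's max(pairs, key=lambda p: lower(p[1]) - lower(p[0]))
def bKey (s : List Int) (p : Int × Int) : Int :=
  ((lowerAux s p.2 0 s.length : Nat) : Int) - ((lowerAux s p.1 0 s.length : Nat) : Int)

def find_longest_match_alt (span_idx : List Int) (st_lis : List Int) (ed_lis : List Int) : List (Option Int) :=
  let pairs := st_lis.zip ed_lis
  let s := PySem.List.sorted span_idx (fun v => v) false
  match PySem.List.max? pairs (fun p => bKey s p) with
  | none => [none, none]
  | some p => [some p.1, some p.2]

-- ===== PRECONDITION & SPEC =====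
-- A asserts st <= ed for every zipped pair; on a pair with st > ed it raises AssertionError, so those inputs are excluded.
def Pre_find_longest_match (span_idx : List Int) (st_lis : List Int) (ed_lis : List Int) : Prop :=
  ∀ p ∈ st_lis.zip ed_lis, p.1 ≤ p.2
instance (span_idx : List Int) (st_lis : List Int) (ed_lis : List Int) : Decidable (Pre_find_longest_match span_idx st_lis ed_lis) := by unfold Pre_find_longest_match; infer_instance
def pvWitness_find_longest_match : List Int × List Int × List Int := ([1, 3], [0, 2], [2, 5])

def Spec_find_longest_match (span_idx : List Int) (st_lis : List Int) (ed_lis : List Int) (out : List (Option Int)) : Prop := out = find_longest_match_alt span_idx st_lis ed_lis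
instance (span_idx : List Int) (st_lis : List Int) (ed_lis : List Int) (out : List (Option Int)) : Decidable (Spec_find_longest_match span_idx st_lis ed_lis out) := by unfold Spec_find_longest_match; infer_instance

-- ===== CLAIM (what is proved, stated in full; the proofs are below) =====
def Claim_equal_find_longest_match : Prop := ∀ (span_idx : List Int) (st_lis : List Int) (ed_lis : List Int), Dom_find_longest_match span_idx st_lis ed_lis → Pre_find_longest_match span_idx st_lis ed_lis → Spec_find_longest_match span_idx st_lis ed_lis (find_longest_match span_idx st_lis ed_lis)

-- ===== LEMMAS AND PROOFS =====

-- A's score of a pair (filter by membership in list(range(st,ed))) is a countP.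
lemma score_eq (span_idx : List Int) (p : Int × Int) :
    ((span_idx.filter (fun idx => (PySem.List.pyRange p.1 p.2 1).contains idx)).length : Int)
      = ((span_idx.countP (fun i => p.1 ≤ i ∧ i < p.2) : Nat) : Int) := by
  induction span_idx with
  | nil => simp
  | cons y t ih =>
    by_cases h : p.1 ≤ y ∧ y < p.2 <;>
      simp [PySem.List.mem_pyRange_one, h] at ih ⊢ <;> omega

-- the binary-search loop computes the number of elements < x (invariant proof)
lemma lowerAux_loop (s : List Int) (x : Int) (hs : s.Pairwise (· ≤ ·)) :
    ∀ (n lo hi : Nat), hi - lo = n → lo ≤ hi → hi ≤ s.length →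
      (∀ i, i < lo → (h : i < s.length) → s[i] < x) →
      (∀ i, hi ≤ i → (h : i < s.length) → ¬ s[i] < x) →
      lowerAux s x lo hi = s.countP (fun v => v < x) := by
  have mono : ∀ i j, (hij : i ≤ j) → (hj : j < s.length) → s[i]'(by omega) ≤ s[j] := by
    intro i j hij hj
    rcases Nat.lt_or_ge i j with hlt | hge
    · exact (List.pairwise_iff_getElem.mp hs) i j (by omega) hj hlt
    · have : i = j := by omega
      subst this; exact le_refl _
  intro n
  induction n using Nat.strong_induction_on with
  | _ n ih =>
    intro lo hi hn hlohi hhilen hlt hge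
    rw [lowerAux]
    by_cases h : lo < hi
    · rw [dif_pos h]
      have hmlen : (lo + hi) / 2 < s.length := by omega
      have hget : s.getD ((lo + hi) / 2) 0 = s[(lo + hi) / 2] := List.getD_eq_getElem s 0 hmlen
      by_cases hcmp : s.getD ((lo + hi) / 2) 0 < x
      · rw [if_pos hcmp]
        refine ih (hi - ((lo + hi) / 2 + 1)) (by omega) ((lo + hi) / 2 + 1) hi rfl (by omega) hhilen ?_ hge
        intro i hi' hilen
        exact lt_of_le_of_lt (mono i ((lo + hi) / 2) (by omega) hmlen) (hget ▸ hcmp)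
      · rw [if_neg hcmp]
        refine ih ((lo + hi) / 2 - lo) (by omega) lo ((lo + hi) / 2) rfl (by omega) (by omega) hlt ?_
        intro i hmi hilen hcon
        exact hcmp (hget ▸ lt_of_le_of_lt (mono ((lo + hi) / 2) i hmi hilen) hcon)
    · rw [dif_neg h]
      have hlohi' : lo = hi := by omega
      have hsplit : s.countP (fun v => v < x) = (s.take lo).countP (fun v => decide (v < x)) + (s.drop lo).countP (fun v => decide (v < x)) := by
        rw [← List.countP_append, List.take_append_drop]
      have hlolen : lo ≤ s.length := by omega
      have h1 : (s.take lo).countP (fun v => decide (v < x)) = lo := by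
        have : (s.take lo).countP (fun v => decide (v < x)) = (s.take lo).length := by
          rw [List.countP_eq_length]
          intro a ha
          obtain ⟨i, hil, rfl⟩ := List.mem_iff_getElem.mp ha
          have hi2 : i < lo := by simpa using (List.length_take .. ▸ hil : i < min lo s.length).trans_le (by omega)
          simp only [List.getElem_take]
          exact decide_eq_true (hlt i hi2 (by omega))
        rw [this, List.length_take]; omega
      have h2 : (s.drop lo).countP (fun v => decide (v < x)) = 0 := by
        rw [List.countP_eq_zero]
        intro a ha
        obtain ⟨i, hil, rfl⟩ := List.mem_iff_getElem.mp ha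
        have hlen : (s.drop lo).length = s.length - lo := List.length_drop ..
        simp only [List.getElem_drop]
        have := hge (lo + i) (by omega) (by omega)
        simpa using this
      omega

lemma lowerAux_eq (s : List Int) (x : Int) (hs : s.Pairwise (· ≤ ·)) :
    lowerAux s x 0 s.length = s.countP (fun v => v < x) := by
  refine lowerAux_loop s x hs (s.length) 0 s.length (by omega) (by omega) (le_refl _) ?_ ?_
  · intro i hi _; omega
  · intro i hi h; omega

-- count of elements in [st, ed) as a difference of two prefix counts (st ≤ ed)
lemma count_split_nat (t : List Int) (a b : Int) (hab : a ≤ b) :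
    t.countP (fun v => v < b) = t.countP (fun v => v < a) + t.countP (fun i => a ≤ i ∧ i < b) := by
  induction t with
  | nil => simp
  | cons y t ih =>
    simp only [List.countP_cons]
    by_cases h1 : y < a <;> by_cases h2 : y < b <;> by_cases h3 : a ≤ y <;>
      simp [h1, h2, h3, Bool.decide_and] at ih ⊢ <;> omega

lemma count_split (span_idx : List Int) (a b : Int) (hab : a ≤ b) :
    ((span_idx.countP (fun v => v < b) : Nat) : Int) - ((span_idx.countP (fun v => v < a) : Nat) : Int)
      = ((span_idx.countP (fun i => a ≤ i ∧ i < b) : Nat) : Int) := by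
  have h := count_split_nat span_idx a b hab
  omega

-- B's key equals A's score on a pair with st ≤ ed
lemma bKey_eq (span_idx : List Int) (p : Int × Int) (hp : p.1 ≤ p.2) :
    bKey (PySem.List.sorted span_idx (fun v => v) false) p
      = ((span_idx.countP (fun i => p.1 ≤ i ∧ i < p.2) : Nat) : Int) := by
  have hs : (PySem.List.sorted span_idx (fun v => v) false).Pairwise (· ≤ ·) := by
    simpa using PySem.List.sorted_pairwise (xs := span_idx) (key := fun v => v)
  have hperm : (PySem.List.sorted span_idx (fun v => v) false).Perm span_idx :=
    PySem.List.sorted_perm ..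
  rw [bKey, lowerAux_eq _ _ hs, lowerAux_eq _ _ hs, hperm.countP_eq, hperm.countP_eq]
  exact count_split span_idx p.1 p.2 hp

-- Python max(key=...) on a nonempty list is a first-max fold
lemma max?_cons_eq (f : Int × Int → Int) (p : Int × Int) (t : List (Int × Int)) :
    PySem.List.max? (p :: t) f
      = some (t.foldl (fun m x => if f m < f x then x else m) p) := by
  suffices h : ∀ (t : List (Int × Int)) (m : Int × Int),
      PySem.List.max? (m :: t) f
        = some (t.foldl (fun m x => if f m < f x then x else m) m) from h t p
  intro t
  induction t with
  | nil => intro m; rfl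
  | cons x t ih =>
    intro m
    have key : PySem.List.max? (m :: x :: t) f
        = PySem.List.max? ((if f m < f x then x else m) :: t) f := by
      unfold PySem.List.max?
      simp only [List.foldl_cons]
      by_cases h : f m < f x <;> simp [h]
    rw [key, ih _]
    simp only [List.foldl_cons]

-- A's best-score loop is the same first-max fold
lemma loop_eq (f : Int × Int → Int) :
    ∀ (t : List (Int × Int)) (m : Int × Int),
      t.foldl (fun (s : Int × Option Int × Option Int) (p : Int × Int) =>
          if s.1 < f p then (f p, some p.1, some p.2) else s)
        (f m, some m.1, some m.2)
      = (f (t.foldl (fun m x => if f m < f x then x else m) m),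
         some (t.foldl (fun m x => if f m < f x then x else m) m).1,
         some (t.foldl (fun m x => if f m < f x then x else m) m).2) := by
  intro t
  induction t with
  | nil => intro m; rfl
  | cons x t ih =>
    intro m
    simp only [List.foldl_cons]
    by_cases h : f m < f x
    · rw [if_pos h, if_pos h]; exact ih x
    · rw [if_neg h, if_neg h]; exact ih m

-- two first-max folds with keys agreeing on the traversed elements coincide
lemma bfold_congr (f g : Int × Int → Int) :
    ∀ (t : List (Int × Int)) (m : Int × Int), (∀ q ∈ t, f q = g q) → f m = g m →
      t.foldl (fun m x => if f m < f x then x else m) m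
        = t.foldl (fun m x => if g m < g x then x else m) m := by
  intro t
  induction t with
  | nil => intro m _ _; rfl
  | cons x t ih =>
    intro m hmem hm
    have hx : f x = g x := hmem x (List.mem_cons_self ..)
    simp only [List.foldl_cons, hm, hx]
    by_cases h : g m < g x
    · rw [if_pos h]
      exact ih x (fun q hq => hmem q (List.mem_cons_of_mem _ hq)) hx
    · rw [if_neg h]
      exact ih m (fun q hq => hmem q (List.mem_cons_of_mem _ hq)) hm

-- ===== VERDICT (by name: the statement is the Claim_ definition above) =====
theorem find_longest_match_spec : Claim_equal_find_longest_match := by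
  intro span_idx st_lis ed_lis _ hpre
  unfold Spec_find_longest_match find_longest_match find_longest_match_alt
  cases hz : st_lis.zip ed_lis with
  | nil => rfl
  | cons p t =>
    have hkey : ∀ q ∈ p :: t,
        bKey (PySem.List.sorted span_idx (fun v => v) false) q
          = ((span_idx.countP (fun i => q.1 ≤ i ∧ i < q.2) : Nat) : Int) := by
      intro q hq
      exact bKey_eq span_idx q (hpre q (hz ▸ hq))
    simp only [List.foldl_cons, score_eq]
    rw [max?_cons_eq]
    have h0 : (-9999 : Int) < ((span_idx.countP (fun i => p.1 ≤ i ∧ i < p.2) : Nat) : Int) :=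
      lt_of_lt_of_le (by norm_num) (Int.natCast_nonneg _)
    rw [if_pos h0, loop_eq (fun q => ((span_idx.countP (fun i => q.1 ≤ i ∧ i < q.2) : Nat) : Int)) t p]
    rw [bfold_congr (fun q => bKey (PySem.List.sorted span_idx (fun v => v) false) q)
          (fun q => ((span_idx.countP (fun i => q.1 ≤ i ∧ i < q.2) : Nat) : Int)) t p
          (fun q hq => hkey q (List.mem_cons_of_mem _ hq)) (hkey p (List.mem_cons_self ..))]
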